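-- pv_equiv track=rewrite | github.com/TrushaSonawane/Offline_recipe_generator | strawberry_recipes_offline.py | normalize_tokens
-- ===== SOURCE A (Python) =====
-- def normalize_tokens(s: str):
--     # comma/space separated, lowercase, trimmed; merge a couple of multi-words
--     tokens = []
--     for chunk in s.split(","):
--         for t in chunk.split():
--             t = t.strip().lower()
--             if t:
--                 tokens.append(t)
--     merged = []
--     i = 0
--     while i < len(tokens):
--         if i + 1 < len(tokens) and f"{tokens[i]} {tokens[i+1]}" in {"olive oil", "soy sauce"}:
--             merged.append(f"{tokens[i]} {tokens[i+1]}")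
--             i += 2
--         else:
--             merged.append(tokens[i])
--             i += 1
--     return set(merged)
-- ===== SOURCE B (Python) =====
-- def normalize_tokens(s: str):
--     # One fused streaming pass: no intermediate token list, no index arithmetic;
--     # a 'pending' previous token replaces the i+1 lookahead of the while-loop.
--     PHRASES = ("olive oil", "soy sauce")
--     result = []
--     pending = None
--     for chunk in s.split(","):
--         for tok in chunk.split():
--             t = tok.strip().lower()
--             if t == "":
--                 continue
--             if pending is None:
--                 pending = t
--             else:
--                 phrase = pending + " " + t
--                 if phrase in PHRASES:
--                     result.append(phrase)
--                     pending = None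
--                 else:
--                     result.append(pending)
--                     pending = t
--     if pending is not None:
--         result.append(pending)
--     return set(result)
-- ===== Notes on version B (the rewrite author's own statement) =====
-- stated objective: alternative
-- what changed: Replaces A's two-phase design (materialize a token list, then an index-based while-loop with i+1 lookahead and i+=2 jumps) by one fused streaming pass that carries the previous token in a one-element buffer and never builds the token list or uses indices.
import Mathlib
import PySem

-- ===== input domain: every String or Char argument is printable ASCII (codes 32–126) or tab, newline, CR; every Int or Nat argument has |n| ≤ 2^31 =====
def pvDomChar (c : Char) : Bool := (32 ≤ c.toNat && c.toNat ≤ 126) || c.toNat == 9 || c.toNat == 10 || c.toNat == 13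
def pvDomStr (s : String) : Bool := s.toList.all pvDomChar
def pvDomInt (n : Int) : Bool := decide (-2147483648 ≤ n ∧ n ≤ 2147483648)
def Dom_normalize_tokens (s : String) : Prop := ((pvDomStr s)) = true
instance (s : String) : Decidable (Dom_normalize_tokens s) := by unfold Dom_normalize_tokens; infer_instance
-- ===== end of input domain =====

-- B replaces A's two-phase token-list + index/lookahead while-loop by one fused
-- streaming pass that buffers the previous token (alternative decomposition, same cost).

-- ===== PORT A =====
-- the while-loop of A as the obvious recursion on the token list (i / i+1 lookahead, i+=2 on a merge)
def mergeA : List String → List String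
  | [] => []
  | [a] => [a]
  | a :: b :: rest =>
    if a ++ " " ++ b = "olive oil" ∨ a ++ " " ++ b = "soy sauce" then
      (a ++ " " ++ b) :: mergeA rest
    else
      a :: mergeA (b :: rest)

def normalize_tokens (s : String) : List String :=
  let tokens := ((PySem.Str.split? s ",").getD []).foldl (fun tokens chunk =>
    (PySem.Str.split₀ chunk).foldl (fun tokens t =>
      let t := PySem.Str.lower (PySem.Str.strip t)
      if t ≠ "" then tokens ++ [t] else tokens) tokens) []
  PySem.Set.ofList (mergeA tokens)

-- ===== PORT B =====
-- one step of B's streaming pass: state = (result so far, pending previous token)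
def altStep (st : List String × Option String) (t : String) : List String × Option String :=
  match st.2 with
  | none => (st.1, some t)
  | some p =>
    if p ++ " " ++ t = "olive oil" ∨ p ++ " " ++ t = "soy sauce" then
      (st.1 ++ [p ++ " " ++ t], none)
    else
      (st.1 ++ [p], some t)

def normalize_tokens_alt (s : String) : List String :=
  let st := ((PySem.Str.split? s ",").getD []).foldl (fun st chunk =>
    (PySem.Str.split₀ chunk).foldl (fun st tok =>
      let t := PySem.Str.lower (PySem.Str.strip tok)
      if t = "" then st else altStep st t) st) (([], none) : List String × Option String)
  let result := match st.2 with
    | some p => st.1 ++ [p]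
    | none => st.1
  PySem.Set.ofList result

-- ===== PRECONDITION & SPEC =====
def Spec_normalize_tokens (s : String) (out : List String) : Prop := out = normalize_tokens_alt s
instance (s : String) (out : List String) : Decidable (Spec_normalize_tokens s out) := by unfold Spec_normalize_tokens; infer_instance

-- ===== CLAIM (what is proved, stated in full; the proofs are below) =====
def Claim_equal_normalize_tokens : Prop := ∀ (s : String), Dom_normalize_tokens s → Spec_normalize_tokens s (normalize_tokens s)

-- ===== LEMMAS AND PROOFS =====

-- the normalized token a raw whitespace token contributes, if any
def normTok (t : String) : Option String :=
  let u := PySem.Str.lower (PySem.Str.strip t)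
  if u = "" then none else some u

def flatToks (chunks : List String) : List String :=
  chunks.flatMap (fun c => (PySem.Str.split₀ c).filterMap normTok)

theorem innerA (toks : List String) (init : List String) :
    toks.foldl (fun tokens t =>
      let t := PySem.Str.lower (PySem.Str.strip t)
      if t ≠ "" then tokens ++ [t] else tokens) init
    = init ++ toks.filterMap normTok := by
  induction toks generalizing init with
  | nil => simp
  | cons t ts ih =>
    rw [List.foldl_cons, ih]
    simp only [List.filterMap_cons, normTok]
    by_cases h : PySem.Str.lower (PySem.Str.strip t) = "" <;>
      simp [h, List.append_assoc]

theorem outerA (chunks : List String) (init : List String) :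
    chunks.foldl (fun tokens chunk =>
      (PySem.Str.split₀ chunk).foldl (fun tokens t =>
        let t := PySem.Str.lower (PySem.Str.strip t)
        if t ≠ "" then tokens ++ [t] else tokens) tokens) init
    = init ++ flatToks chunks := by
  induction chunks generalizing init with
  | nil => simp [flatToks]
  | cons c cs ih =>
    rw [List.foldl_cons, innerA, ih]
    simp [flatToks, List.flatMap_cons, List.append_assoc]

theorem innerB (toks : List String) (st : List String × Option String) :
    toks.foldl (fun st tok =>
      let t := PySem.Str.lower (PySem.Str.strip tok)
      if t = "" then st else altStep st t) st
    = (toks.filterMap normTok).foldl altStep st := by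
  induction toks generalizing st with
  | nil => simp
  | cons t ts ih =>
    rw [List.foldl_cons, ih]
    simp only [List.filterMap_cons, normTok]
    by_cases h : PySem.Str.lower (PySem.Str.strip t) = "" <;> simp [h, altStep]

theorem outerB (chunks : List String) (st : List String × Option String) :
    chunks.foldl (fun st chunk =>
      (PySem.Str.split₀ chunk).foldl (fun st tok =>
        let t := PySem.Str.lower (PySem.Str.strip tok)
        if t = "" then st else altStep st t) st) st
    = (flatToks chunks).foldl altStep st := by
  induction chunks generalizing st with
  | nil => simp [flatToks]
  | cons c cs ih =>
    rw [List.foldl_cons, innerB, ih]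
    simp [flatToks, List.flatMap_cons, List.foldl_append]

def pendList : Option String → List String
  | none => []
  | some p => [p]

def finalize (st : List String × Option String) : List String :=
  match st.2 with
  | some p => st.1 ++ [p]
  | none => st.1

theorem stream_eq_merge (ts : List String) (acc : List String) (pend : Option String) :
    finalize (ts.foldl altStep (acc, pend)) = acc ++ mergeA (pendList pend ++ ts) := by
  induction ts generalizing acc pend with
  | nil =>
    cases pend <;> simp [finalize, pendList, mergeA]
  | cons t ts ih =>
    cases pend with
    | none =>
      simpa [altStep, pendList] using ih acc (some t)
    | some p =>
      by_cases h : p ++ " " ++ t = "olive oil" ∨ p ++ " " ++ t = "soy sauce"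
      · simp [altStep, h, pendList, ih, mergeA]
      · simp [altStep, h, pendList, ih, mergeA]

-- ===== VERDICT (by name: the statement is the Claim_ definition above) =====
theorem normalize_tokens_spec : Claim_equal_normalize_tokens := by
  intro s _
  unfold Spec_normalize_tokens normalize_tokens normalize_tokens_alt
  rw [outerA, outerB]
  have h := stream_eq_merge (flatToks ((PySem.Str.split? s ",").getD [])) [] none
  simp only [pendList, List.nil_append, finalize] at h ⊢
  rw [h]
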